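-- pv_equiv track=rewrite | github.com/kawafuchieirin/stocks-study | data-platform/tests/conftest.py | _mock_get_resolved_options
-- ===== SOURCE A (Python) =====
-- def _mock_get_resolved_options(args, options):
--     """getResolvedOptions のモック実装。"""
--     result = {}
--     for opt in options:
--         key = f"--{opt}"
--         if key in args:
--             idx = args.index(key)
--             result[opt] = args[idx + 1] if idx + 1 < len(args) else ""
--     return result
-- ===== SOURCE B (Python) =====
-- def _mock_get_resolved_options(args, options):
--     """getResolvedOptions のモック実装 — single pass over the args sequence itself."""
--     opts = set(options)
--     found = {}
--     for flag, nxt in zip(args, args[1:] + [""]):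
--         name = flag[2:]
--         if flag.startswith("--") and name in opts and name not in found:
--             found[name] = nxt
--     return {o: found[o] for o in options if o in found}
-- ===== Notes on version B (the rewrite author's own statement) =====
-- stated objective: faster
-- what changed: B inverts the traversal: one pass over the args sequence paired with its successor (zip(args, args[1:]+[''])), decoding each '--name' flag and recording its following value on first occurrence into a set-filtered accumulator, then a dict comprehension over options restores A's key order; A instead scans args twice per option ('in' plus .index).
import Mathlib
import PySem

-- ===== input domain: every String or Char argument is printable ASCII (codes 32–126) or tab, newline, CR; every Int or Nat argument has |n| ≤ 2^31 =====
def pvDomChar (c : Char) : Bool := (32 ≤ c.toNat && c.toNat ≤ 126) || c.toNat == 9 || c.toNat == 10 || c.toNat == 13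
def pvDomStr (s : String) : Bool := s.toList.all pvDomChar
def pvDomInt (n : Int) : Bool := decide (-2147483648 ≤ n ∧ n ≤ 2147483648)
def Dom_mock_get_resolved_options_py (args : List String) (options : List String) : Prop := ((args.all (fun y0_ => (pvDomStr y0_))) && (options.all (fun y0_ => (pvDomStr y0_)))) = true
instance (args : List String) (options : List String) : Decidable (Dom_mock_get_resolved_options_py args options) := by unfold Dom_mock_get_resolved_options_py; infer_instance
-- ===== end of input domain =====

-- B inverts the traversal: one pass over args zipped with its successor collects each '--name' flag's value on first occurrence, then a pass over options restores A's key order (faster: no per-option scan of args).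

-- ===== PORT A =====
-- for opt in options: key = "--"+opt; if key in args: idx = args.index(key); result[opt] = args[idx+1] if idx+1 < len(args) else ""
def mock_get_resolved_options_py (args : List String) (options : List String) : List (String × String) :=
  (options.foldl (fun (result : PySem.Dict String String) opt =>
      let key := "--" ++ opt
      if args.contains key then
        match PySem.List.index? args key with
        | some idx =>
            result.insert opt (if (idx : Int) + 1 < (args.length : Int) then PySem.List.pyGetD args ((idx : Int) + 1) "" else "")
        | none => result   -- unreachable: key ∈ args
      else result) PySem.Dict.empty).items

-- ===== PORT B =====
-- opts = set(options)
-- for flag, nxt in zip(args, args[1:] + [""]): if flag.startswith("--") and flag[2:] in opts and flag[2:] not in found: found[flag[2:]] = nxt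
-- return {o: found[o] for o in options if o in found}
def mock_get_resolved_options_py_alt (args : List String) (options : List String) : List (String × String) :=
  let opts := PySem.Set.ofList options
  let found : PySem.Dict String String :=
    (args.zip (args.drop 1 ++ [""])).foldl
      (fun found p =>
        if PySem.Str.startswith p.1 "--" && opts.contains (PySem.Str.slice p.1 (some 2) none)
            && !(found.contains (PySem.Str.slice p.1 (some 2) none)) then
          found.insert (PySem.Str.slice p.1 (some 2) none) p.2
        else found)
      PySem.Dict.empty
  (options.foldl (fun (r : PySem.Dict String String) o =>
      match found.get? o with
      | some v => r.insert o v
      | none => r) PySem.Dict.empty).items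

-- ===== PRECONDITION & SPEC =====
def Spec_mock_get_resolved_options_py (args : List String) (options : List String) (out : List (String × String)) : Prop := out = mock_get_resolved_options_py_alt args options
instance (args : List String) (options : List String) (out : List (String × String)) : Decidable (Spec_mock_get_resolved_options_py args options out) := by unfold Spec_mock_get_resolved_options_py; infer_instance

-- ===== CLAIM (what is proved, stated in full; the proofs are below) =====
def Claim_equal_mock_get_resolved_options_py : Prop := ∀ (args : List String) (options : List String), Dom_mock_get_resolved_options_py args options → Spec_mock_get_resolved_options_py args options (mock_get_resolved_options_py args options)

-- ===== LEMMAS AND PROOFS =====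

-- a string is exactly "--" ++ k iff it starts with "--" and its [2:] slice is k
lemma flag_eq_iff (x k : String) :
    (PySem.Str.startswith x "--" = true ∧ PySem.Str.slice x (some 2) none = k) ↔ x = "--" ++ k := by
  have hdd : ("--" : String).toList = ['-','-'] := rfl
  have hsw : PySem.Str.startswith x "--" = true ↔ ['-','-'] <+: x.toList := by
    rw [PySem.Str.startswith_eq, PySem.Chars.startswith_iff, hdd]
  have hsl : (PySem.Str.slice x (some 2) none).toList = x.toList.drop 2 := by simp [pysem]
  rw [← String.toList_inj, ← String.toList_inj, hsl]
  rw [hsw]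
  constructor
  · rintro ⟨⟨t, ht⟩, h2⟩
    simp [← ht] at h2 ⊢
    exact h2
  · intro h
    exact ⟨⟨k.toList, by simp [h]⟩, by simp [h]⟩

-- B's one-pass accumulator answers, at any key k ∈ options, exactly A's first-occurrence scan of args
lemma found_get? (options : List String) (args : List String) (d : PySem.Dict String String) (k : String)
    (hk : k ∈ options) :
    ((args.zip (args.drop 1 ++ [""])).foldl
      (fun found p =>
        if PySem.Str.startswith p.1 "--" && (PySem.Set.ofList options).contains (PySem.Str.slice p.1 (some 2) none)
            && !(found.contains (PySem.Str.slice p.1 (some 2) none)) then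
          found.insert (PySem.Str.slice p.1 (some 2) none) p.2
        else found) d).get? k
    = ((d.get? k).orElse (fun _ => (PySem.List.index? args ("--" ++ k)).map (fun i => args.getD (i + 1) ""))) := by
  induction args generalizing d with
  | nil =>
      cases h : d.get? k <;> simp [PySem.List.index?_eq_idxOf?, h, Option.orElse]
  | cons x tl ih =>
      have hpairs : (x::tl).zip (((x::tl).drop 1) ++ [""]) = (x, tl.headD "") :: tl.zip (tl.drop 1 ++ [""]) := by
        cases tl <;> simp
      rw [hpairs, List.foldl_cons]
      by_cases hx : x = "--" ++ k
      · subst hx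
        obtain ⟨hsw, hsl⟩ := (flag_eq_iff ("--" ++ k) k).mpr rfl
        have hco : (PySem.Set.ofList options).contains k = true := by
          simp [PySem.Set.contains]
          exact hk
        rw [hsl, hsw, hco]
        simp only [Bool.true_and]
        have hidx : PySem.List.index? (("--" ++ k) :: tl) ("--" ++ k) = some 0 :=
          PySem.List.index?_cons_self _ _
        by_cases hd : d.contains k = true
        · obtain ⟨v, hv⟩ : ∃ v, d.get? k = some v := by
            rw [PySem.Dict.contains_eq_isSome_get?] at hd
            exact Option.isSome_iff_exists.mp hd
          rw [hd]
          simp only [Bool.not_true]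
          rw [if_neg (by decide)]
          rw [ih d]
          simp [hv, Option.orElse]
        · have hd' : d.contains k = false := by simpa using hd
          have hdk : d.get? k = none := by
            rw [PySem.Dict.contains_eq_isSome_get?] at hd'
            exact Option.not_isSome_iff_eq_none.mp (by simp [hd'])
          rw [hd']
          simp only [Bool.not_false]
          simp only [if_true]
          rw [ih]
          rw [PySem.Dict.get?_insert_self]
          rw [hidx, hdk]
          simp only [Option.orElse, Option.map]
          cases tl <;> simp
      · rw [ih]
        have hstep : ((if PySem.Str.startswith x "--" && (PySem.Set.ofList options).contains (PySem.Str.slice x (some 2) none)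
              && !(d.contains (PySem.Str.slice x (some 2) none)) then
            d.insert (PySem.Str.slice x (some 2) none) (tl.headD "")
          else d) : PySem.Dict String String).get? k = d.get? k := by
          split_ifs with hcond
          · have hnk : k ≠ PySem.Str.slice x (some 2) none := by
              intro h
              exact hx ((flag_eq_iff x k).mp ⟨(by simp only [Bool.and_eq_true] at hcond; exact hcond.1.1), h.symm⟩)
            exact PySem.Dict.get?_insert_of_ne _ _ hnk
          · rfl
        rw [hstep]
        rw [PySem.List.index?_cons_of_ne (x := x) (v := "--" ++ k) tl hx]
        cases hdk : d.get? k with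
        | some v => simp [Option.orElse]
        | none =>
            simp only [Option.orElse, Option.map_map]
            cases hti : PySem.List.index? tl ("--" ++ k) with
            | none => simp
            | some m => simp [Function.comp]

-- ===== VERDICT (by name: the statement is the Claim_ definition above) =====
theorem mock_get_resolved_options_py_spec : Claim_equal_mock_get_resolved_options_py := by
  intro args options _
  unfold Spec_mock_get_resolved_options_py
  simp only [mock_get_resolved_options_py, mock_get_resolved_options_py_alt]
  congr 1
  apply PySem.List.foldl_congr_mem
  intro acc opt hm
  have hfound := found_get? options args PySem.Dict.empty opt hm
  rw [PySem.Dict.get?_empty] at hfound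
  simp only [Option.orElse] at hfound
  simp only [hfound]
  cases hi : PySem.List.index? args ("--" ++ opt) with
  | none =>
      have hnm : ("--" ++ opt) ∉ args := (PySem.List.index?_eq_none_iff args _).mp hi
      have hc : args.contains ("--" ++ opt) = false := by simpa using hnm
      simp only [hc, Bool.false_eq_true, if_false, Option.map_none]
  | some idx =>
      have hmem : ("--" ++ opt) ∈ args :=
        (PySem.List.index?_isSome_iff args ("--" ++ opt)).mp (by rw [hi]; rfl)
      have hc : args.contains ("--" ++ opt) = true := by simpa using hmem
      obtain ⟨hlt, -, -⟩ := PySem.List.getElem_of_index?_eq_some hi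
      simp only [hc, if_true, Option.map_some]
      congr 1
      have hcast : (idx : Int) + 1 = ((idx + 1 : Nat) : Int) := by push_cast; ring
      rw [hcast, PySem.List.pyGetD_natCast]
      split_ifs with h
      · rfl
      · have hge : args.length ≤ idx + 1 := by exact_mod_cast (by omega : (args.length : Int) ≤ (idx : Int) + 1)
        rw [List.getD_eq_default]
        omega
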